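-- pv_equiv track=rewrite | github.com/981377660LMT/algorithm-study | 11_动态规划/经典题/DI序列/484. 寻找排列.py | findPermutation2
-- ===== SOURCE A (Python) =====
-- from heapq import heappop, heappush
-- from typing import List
--
-- def findPermutation2(pattern: str) -> List[int]:
--     """寻找DI序列的字典序最小排列  O(nlogn)
--
--     拓扑排序+pq
--     沿着有向边走 数字逐渐递增 每次取出没用过的最小编号填入最小值
--     """
--     n = len(pattern) + 1
--     deg, adjList = [0] * n, [[] for _ in range(n)]
--
--     res = []
--     for i, char in enumerate(pattern):
--         if char == "I":
--             deg[i + 1] += 1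
--             adjList[i].append(i + 1)
--         else:
--             deg[i] += 1
--             adjList[i + 1].append(i)
--
--     pq = [i for i in range(n) if deg[i] == 0]
--     min_, res = 1, [0] * n
--     while pq:
--         cur = heappop(pq)  # 当前可用的最小序号
--         res[cur] = min_
--         min_ += 1
--         for next in adjList[cur]:
--             deg[next] -= 1
--             if deg[next] == 0:
--                 heappush(pq, next)
--     return res
-- ===== SOURCE B (Python) =====
-- def findPermutation2(pattern):
--     """One-pass stack: push 1..n; flush (pop all) at each 'I' and at the end."""
--     res, stack = [], []
--     n = len(pattern) + 1
--     for i in range(1, n + 1):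
--         stack.append(i)
--         if i == n or pattern[i - 1] == 'I':
--             while stack:
--                 res.append(stack.pop())
--     return res
-- ===== Notes on version B (the rewrite author's own statement) =====
-- stated objective: faster
-- what changed: A builds an explicit graph (degree array + adjacency lists) and runs a heap-based topological sort; B does a single left-to-right pass with a stack, pushing 1..n and flushing the stack at every 'I' (and at the end), which reverses each maximal run of non-'I' characters.
import Mathlib
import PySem

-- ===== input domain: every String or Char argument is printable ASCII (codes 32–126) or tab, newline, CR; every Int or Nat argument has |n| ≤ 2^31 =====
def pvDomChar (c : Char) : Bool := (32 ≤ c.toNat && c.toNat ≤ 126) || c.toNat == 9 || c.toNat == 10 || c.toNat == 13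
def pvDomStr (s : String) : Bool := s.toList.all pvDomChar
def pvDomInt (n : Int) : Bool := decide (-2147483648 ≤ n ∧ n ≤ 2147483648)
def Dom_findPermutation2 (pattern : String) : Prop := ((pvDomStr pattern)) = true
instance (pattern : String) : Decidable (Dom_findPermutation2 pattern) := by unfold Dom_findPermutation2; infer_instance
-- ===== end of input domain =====

-- B replaces A's graph + heap topological sort by a one-pass stack (flush at each 'I'): faster (O(n) vs O(n log n)).

-- ===== PORT A =====
-- deg[i] += 1  (Python list index update; index always in range here)
def incAt (l : List Nat) (i : Nat) : List Nat := l.set i (l.getD i 0 + 1)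
-- adjList[i].append(x)
def pushAt (l : List (List Nat)) (i : Nat) (x : Nat) : List (List Nat) := l.set i (l.getD i [] ++ [x])

-- for i, char in enumerate(pattern): build deg and adjList
def build : List Char → Nat → List Nat → List (List Nat) → List Nat × List (List Nat)
  | [], _, deg, adj => (deg, adj)
  | c :: cs, i, deg, adj =>
    if c = 'I' then build cs (i+1) (incAt deg (i+1)) (pushAt adj i (i+1))
    else build cs (i+1) (incAt deg i) (pushAt adj (i+1) i)

-- the while-pq loop; the heap pq is modeled as an ascending sorted list
-- (heappop = take the minimum = the head, heappush = ordered insert); fuel = n bounds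
-- the number of iterations (each iteration pops one element, each node is pushed at most once)
-- loop body of "for next in adjList[cur]": deg[next] -= 1; if deg[next] == 0: heappush(pq, next)
def relaxStep (st : List Nat × List Nat) (nxt : Nat) : List Nat × List Nat :=
  let deg' := st.1.set nxt (st.1.getD nxt 0 - 1)
  if deg'.getD nxt 0 = 0 then (deg', st.2.orderedInsert (· ≤ ·) nxt) else (deg', st.2)

def loopA : Nat → List Nat → List (List Nat) → List Nat → List Int → Int → List Int
  | 0, _, _, _, res, _ => res
  | fuel+1, deg, adj, pq, res, m =>
    match pq with
    | [] => res
    | cur :: pqrest =>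
      let res' := res.set cur m
      let st := (adj.getD cur []).foldl relaxStep (deg, pqrest)
      loopA fuel st.1 adj st.2 res' (m + 1)

def listA (cs : List Char) : List Int :=
  let n := cs.length + 1
  let dg := build cs 0 (List.replicate n 0) (List.replicate n [])
  let pq := (List.range n).filter (fun i => dg.1.getD i 0 == 0)
  loopA n dg.1 dg.2 pq (List.replicate n 0) 1

def findPermutation2 (pattern : String) : List Int := listA pattern.toList

-- ===== PORT B =====
-- one pass with a stack: push the next number; at an 'I' (or at the end) pop the whole stack
def altGo : List Char → Int → List Int → List Int
  | [], k, stack => k :: stack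
  | c :: cs, k, stack =>
    if c = 'I' then (k :: stack) ++ altGo cs (k+1) [] else altGo cs (k+1) (k :: stack)

def findPermutation2_alt (pattern : String) : List Int := altGo pattern.toList 1 []

-- ===== PRECONDITION & SPEC =====
def Spec_findPermutation2 (pattern : String) (out : List Int) : Prop := out = findPermutation2_alt pattern
instance (pattern : String) (out : List Int) : Decidable (Spec_findPermutation2 pattern out) := by unfold Spec_findPermutation2; infer_instance

-- ===== CLAIM (what is proved, stated in full; the proofs are below) =====
def Claim_equal_findPermutation2 : Prop := ∀ (pattern : String), Dom_findPermutation2 pattern → Spec_findPermutation2 pattern (findPermutation2 pattern)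

-- ===== LEMMAS AND PROOFS =====

-- [d, d-1, ..., 1] as integers
def desc1 : Nat → List Int
  | 0 => []
  | n+1 => ((n : Int) + 1) :: desc1 n

-- the degree vector of the pattern graph, node by node
def bump : List Nat → List Nat
  | [] => []
  | x :: xs => (x+1) :: xs

def degL : List Char → List Nat
  | [] => [0]
  | c :: cs => if c = 'I' then 0 :: bump (degL cs) else 1 :: degL cs

-- the adjacency lists of the pattern graph, node by node
def prep0 : List (List Nat) → List (List Nat)
  | [] => []
  | x :: xs => (0 :: x) :: xs

def shiftA (a : List (List Nat)) : List (List Nat) := a.map (List.map (· + 1))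

def adjL : List Char → List (List Nat)
  | [] => [[]]
  | c :: cs => if c = 'I' then [1] :: shiftA (adjL cs) else [] :: prep0 (shiftA (adjL cs))

theorem degL_length (cs : List Char) : (degL cs).length = cs.length + 1 := by
  induction cs with
  | nil => rfl
  | cons c cs ih =>
    simp only [degL]
    split
    · cases h : degL cs with
      | nil => simp [h] at ih
      | cons x xs => simp [bump, h] at ih ⊢; omega
    · simpa using ih

theorem prep0_length (a : List (List Nat)) : (prep0 a).length = a.length := by
  cases a <;> simp [prep0]

theorem shiftA_length (a : List (List Nat)) : (shiftA a).length = a.length := by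
  simp [shiftA]

theorem adjL_length (cs : List Char) : (adjL cs).length = cs.length + 1 := by
  induction cs with
  | nil => rfl
  | cons c cs ih =>
    simp only [adjL]
    split <;> simp [prep0_length, shiftA_length, ih]

theorem getD_append_len {α : Type} (a b : List α) (d : α) (i : Nat) :
    (a ++ b).getD (a.length + i) d = b.getD i d := by
  rw [List.getD_append_right a b d _ (by omega)]
  simp

theorem set_append_len {α : Type} (a b : List α) (v : α) (i : Nat) :
    (a ++ b).set (a.length + i) v = a ++ b.set i v := by
  rw [List.set_append]
  simp

theorem zip_shift (sa : List (List Nat)) (A : List (List Nat)) (i : Nat) :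
    List.zipWith (fun s a => s ++ a.map (· + i)) sa (shiftA A) =
      List.zipWith (fun s a => s ++ a.map (· + (i+1))) sa A := by
  induction sa generalizing A with
  | nil => simp
  | cons x xs ih =>
    cases A with
    | nil => simp [shiftA]
    | cons a as =>
      simp only [shiftA, List.map_cons, List.zipWith_cons_cons]
      have hh : List.map (fun x => x + i) (List.map (fun x => x + 1) a)
          = List.map (fun x => x + (i+1)) a := by
        rw [List.map_map]; apply List.map_congr_left; intro y _; simp [Function.comp]; omega
      rw [hh]
      have h2 := ih as
      simp only [shiftA] at h2
      rw [h2]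

theorem build_eq : ∀ (cs : List Char) (i : Nat) (pre suf : List Nat) (preA sufA : List (List Nat)),
    pre.length = i → preA.length = i → suf.length = cs.length + 1 → sufA.length = cs.length + 1 →
    build cs i (pre ++ suf) (preA ++ sufA) =
      (pre ++ List.zipWith (· + ·) suf (degL cs),
       preA ++ List.zipWith (fun s a => s ++ a.map (· + i)) sufA (adjL cs)) := by
  intro cs
  induction cs with
  | nil =>
    intro i pre suf preA sufA hpre hpreA hsuf hsufA
    match suf, hsuf with
    | [x], _ =>
      match sufA, hsufA with
      | [ya], _ => simp [build, degL, adjL]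
  | cons c cs ih =>
    intro i pre suf preA sufA hpre hpreA hsuf hsufA
    have hs1 : suf.length = cs.length + 2 := by simpa using hsuf
    have hs2 : sufA.length = cs.length + 2 := by simpa using hsufA
    match suf, hs1 with
    | x :: y :: suf'', hs1 =>
      match sufA, hs2 with
      | xa :: sufA', hs2 =>
        by_cases hc : c = 'I'
        · -- deg[i+1] += 1 ; adj[i].append (i+1)
          have e1 : incAt (pre ++ x :: y :: suf'') (i+1) = pre ++ x :: (y+1) :: suf'' := by
            have g : (pre ++ x :: y :: suf'').getD (i+1) 0 = y := by
              have : i + 1 = pre.length + 1 := by omega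
              rw [this, getD_append_len]; rfl
            have s : (pre ++ x :: y :: suf'').set (i+1) (y+1) = pre ++ x :: (y+1) :: suf'' := by
              have : i + 1 = pre.length + 1 := by omega
              rw [this, set_append_len]; rfl
            unfold incAt
            rw [g]
            exact s
          have e2 : pushAt (preA ++ xa :: sufA') i (i+1) = preA ++ (xa ++ [i+1]) :: sufA' := by
            have g : (preA ++ xa :: sufA').getD i [] = xa := by
              have : i = preA.length + 0 := by omega
              rw [this, getD_append_len]; rfl
            have s : (preA ++ xa :: sufA').set i (xa ++ [i+1]) = preA ++ (xa ++ [i+1]) :: sufA' := by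
              have : i = preA.length + 0 := by omega
              rw [this, set_append_len]; rfl
            unfold pushAt
            rw [g]
            exact s
          have step : build (c :: cs) i (pre ++ x :: y :: suf'') (preA ++ xa :: sufA')
              = build cs (i+1) ((pre ++ [x]) ++ (y+1) :: suf'') ((preA ++ [xa ++ [i+1]]) ++ sufA') := by
            simp [build, hc, e1, e2]
          rw [step, ih (i+1) (pre ++ [x]) ((y+1) :: suf'') (preA ++ [xa ++ [i+1]]) sufA'
              (by simp; omega) (by simp; omega) (by simpa using hs1) (by simpa using hs2)]
          have hdegnil : ∃ h t, degL cs = h :: t := by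
            cases hdg : degL cs with
            | nil => have := degL_length cs; rw [hdg] at this; simp at this
            | cons h t => exact ⟨h, t, rfl⟩
          obtain ⟨h, t, hdg⟩ := hdegnil
          simp only [Prod.mk.injEq]
          refine ⟨?_, ?_⟩
          · simp only [degL, if_pos hc, hdg, bump, List.zipWith_cons_cons, List.append_assoc,
              List.cons_append, List.nil_append]
            have e : y + 1 + h = y + (h + 1) := by omega
            have e2' : x + 0 = x := by omega
            rw [e, e2']
          · simp only [adjL, if_pos hc, List.zipWith_cons_cons, List.append_assoc,
              List.cons_append, List.nil_append, List.map_cons, List.map_nil, zip_shift]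
            have e : 1 + i = i + 1 := by omega
            rw [e]
        · -- deg[i] += 1 ; adj[i+1].append i
          have hsA1 : ∃ ya tA, sufA' = ya :: tA := by
            cases sufA' with
            | nil => simp at hs2
            | cons ya tA => exact ⟨ya, tA, rfl⟩
          obtain ⟨ya, tA, rfl⟩ := hsA1
          have e1 : incAt (pre ++ x :: y :: suf'') i = pre ++ (x+1) :: y :: suf'' := by
            have g : (pre ++ x :: y :: suf'').getD i 0 = x := by
              have : i = pre.length + 0 := by omega
              rw [this, getD_append_len]; rfl
            have s : (pre ++ x :: y :: suf'').set i (x+1) = pre ++ (x+1) :: y :: suf'' := by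
              have : i = pre.length + 0 := by omega
              rw [this, set_append_len]; rfl
            unfold incAt
            rw [g]
            exact s
          have e2 : pushAt (preA ++ xa :: ya :: tA) (i+1) i = preA ++ xa :: (ya ++ [i]) :: tA := by
            have g : (preA ++ xa :: ya :: tA).getD (i+1) [] = ya := by
              have : i + 1 = preA.length + 1 := by omega
              rw [this, getD_append_len]; rfl
            have s : (preA ++ xa :: ya :: tA).set (i+1) (ya ++ [i]) = preA ++ xa :: (ya ++ [i]) :: tA := by
              have : i + 1 = preA.length + 1 := by omega
              rw [this, set_append_len]; rfl
            unfold pushAt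
            rw [g]
            exact s
          have step : build (c :: cs) i (pre ++ x :: y :: suf'') (preA ++ xa :: ya :: tA)
              = build cs (i+1) ((pre ++ [x+1]) ++ y :: suf'') ((preA ++ [xa]) ++ (ya ++ [i]) :: tA) := by
            simp [build, hc, e1, e2]
          rw [step, ih (i+1) (pre ++ [x+1]) (y :: suf'') (preA ++ [xa]) ((ya ++ [i]) :: tA)
              (by simp; omega) (by simp; omega) (by simpa using hs1) (by simpa using hs2)]
          have hAnil : ∃ a0 A', adjL cs = a0 :: A' := by
            cases hA : adjL cs with
            | nil => have := adjL_length cs; rw [hA] at this; simp at this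
            | cons a0 A' => exact ⟨a0, A', rfl⟩
          obtain ⟨a0, A', hA⟩ := hAnil
          simp only [Prod.mk.injEq]
          refine ⟨?_, ?_⟩
          · simp only [degL, if_neg hc, List.zipWith_cons_cons, List.append_assoc,
              List.cons_append, List.nil_append]
          · simp only [adjL, if_neg hc, hA, shiftA, List.map_cons, prep0,
              List.zipWith_cons_cons, List.map_map]
            have hz := zip_shift tA A' i
            simp only [shiftA] at hz
            rw [hz]
            have hh : (0 + i) :: List.map ((fun x => x + i) ∘ fun x => x + 1) a0
                = i :: List.map (fun x => x + (i + 1)) a0 := by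
              have e0 : 0 + i = i := by omega
              rw [e0]
              congr 1
              apply List.map_congr_left; intro z _; simp [Function.comp]; omega
            rw [hh]
            simp [List.append_assoc]

theorem zipWith_zero_add : ∀ (L : List Nat), List.zipWith (· + ·) (List.replicate L.length 0) L = L := by
  intro L
  induction L with
  | nil => rfl
  | cons x xs ih =>
    simp only [List.length_cons, List.replicate_succ, List.zipWith_cons_cons, ih]
    simp

theorem zipWith_nil_adj : ∀ (L : List (List Nat)),
    List.zipWith (fun s a => s ++ a.map (· + 0)) (List.replicate L.length ([] : List Nat)) L = L := by
  intro L
  induction L with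
  | nil => rfl
  | cons x xs ih =>
    simp only [List.length_cons, List.replicate_succ, List.zipWith_cons_cons, ih]
    simp

theorem build_init (cs : List Char) :
    build cs 0 (List.replicate (cs.length + 1) 0) (List.replicate (cs.length + 1) []) =
      (degL cs, adjL cs) := by
  have h := build_eq cs 0 [] (List.replicate (cs.length + 1) 0) [] (List.replicate (cs.length + 1) [])
    rfl rfl (by simp) (by simp)
  simp only [List.nil_append] at h
  rw [h]
  have d1 : List.zipWith (· + ·) (List.replicate (cs.length + 1) 0) (degL cs) = degL cs := by
    rw [← degL_length cs]; exact zipWith_zero_add _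
  have d2 : List.zipWith (fun s a => s ++ a.map (· + 0)) (List.replicate (cs.length + 1) ([] : List Nat)) (adjL cs) = adjL cs := by
    rw [← adjL_length cs]; exact zipWith_nil_adj _
  rw [d1, d2]

-- ---------- small facts about desc1, degL, adjL ----------

theorem desc1_length (n : Nat) : (desc1 n).length = n := by
  induction n with
  | zero => rfl
  | succ n ih => simp [desc1, ih]

theorem desc1_step (n : Nat) (t : Int) :
    (desc1 (n+1)).map (· + t) = (desc1 n).map (· + (t+1)) ++ [t+1] := by
  induction n generalizing t with
  | zero => simp [desc1]; ring
  | succ n ih =>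
    have hih := ih t
    rw [show desc1 (n+1) = ((n:Int)+1) :: desc1 n from rfl, List.map_cons] at hih
    rw [show desc1 (n+1+1) = ((n:Int)+1+1) :: desc1 (n+1) from rfl,
        show desc1 (n+1) = ((n:Int)+1) :: desc1 n from rfl]
    simp only [List.map_cons, List.cons_append]
    rw [hih]
    congr 1
    ring

theorem degL_ne_nil (cs : List Char) : ∃ h t, degL cs = h :: t := by
  cases hdg : degL cs with
  | nil => have := degL_length cs; rw [hdg] at this; simp at this
  | cons h t => exact ⟨h, t, rfl⟩

theorem degL_run (R rest : List Char) (h : ∀ c ∈ R, c ≠ 'I') :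
    degL (R ++ rest) = List.replicate R.length 1 ++ degL rest := by
  induction R with
  | nil => simp
  | cons c R ih =>
    have hc : c ≠ 'I' := h c (by simp)
    simp only [List.cons_append, degL, if_neg hc, List.length_cons, List.replicate_succ]
    rw [ih (fun x hx => h x (by simp [hx]))]

theorem prep0_append (X Y : List (List Nat)) (h : X ≠ []) : prep0 (X ++ Y) = prep0 X ++ Y := by
  cases X with
  | nil => exact absurd rfl h
  | cons x xs => rfl

theorem prep0_getD_succ (X : List (List Nat)) (k : Nat) : (prep0 X).getD (k+1) [] = X.getD (k+1) [] := by
  cases X <;> simp [prep0]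

theorem shiftA_getD (X : List (List Nat)) (k : Nat) :
    (shiftA X).getD k [] = (X.getD k []).map (· + 1) := by
  simp only [shiftA, List.getD_eq_getElem?_getD, List.getElem?_map]
  cases X[k]? <;> simp

theorem mapmap_add (A : List (List Nat)) (a b : Nat) :
    (A.map (List.map (· + a))).map (List.map (· + b)) = A.map (List.map (· + (a + b))) := by
  rw [List.map_map]
  apply List.map_congr_left
  intro x _
  rw [Function.comp_apply, List.map_map]
  apply List.map_congr_left
  intro y _
  simp [Function.comp]
  omega

theorem adjL_split (R cs' : List Char) (h : ∀ c ∈ R, c ≠ 'I') :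
    ∃ pre : List (List Nat), pre.length = R.length + 1 ∧
      adjL (R ++ 'I' :: cs') = pre ++ (adjL cs').map (List.map (· + (R.length + 1))) := by
  induction R with
  | nil =>
    refine ⟨[[1]], rfl, ?_⟩
    simp [adjL, shiftA]
  | cons c R ih =>
    have hc : c ≠ 'I' := h c (by simp)
    obtain ⟨pre, hlen, heq⟩ := ih (fun x hx => h x (by simp [hx]))
    have hpre : pre ≠ [] := by intro hn; rw [hn] at hlen; simp at hlen
    refine ⟨[] :: prep0 (shiftA pre), ?_, ?_⟩
    · simp [prep0_length, shiftA_length, hlen]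
    · simp only [List.cons_append, adjL, if_neg hc, heq]
      have : shiftA (pre ++ (adjL cs').map (List.map (· + (R.length + 1))))
          = shiftA pre ++ (adjL cs').map (List.map (· + (R.length + 1 + 1))) := by
        simp only [shiftA, List.map_append]
        rw [mapmap_add]
      rw [this, prep0_append _ _ (by simp [shiftA]; intro hn; exact hpre hn)]
      simp only [List.length_cons]

theorem adjL_getD_zero (R rest : List Char) (h : ∀ c ∈ R, c ≠ 'I') (hne : R ≠ []) :
    (adjL (R ++ rest)).getD 0 [] = [] := by
  cases R with
  | nil => exact absurd rfl hne
  | cons c R =>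
    have hc : c ≠ 'I' := h c (by simp)
    simp [adjL, hc]

theorem adjL_getD_mid (R rest : List Char) (h : ∀ c ∈ R, c ≠ 'I') :
    ∀ j, 1 ≤ j → j < R.length → (adjL (R ++ rest)).getD j [] = [j-1] := by
  induction R with
  | nil => intro j h1 h2; simp at h2
  | cons c R ih =>
    intro j h1 h2
    have hc : c ≠ 'I' := h c (by simp)
    simp only [List.cons_append, adjL, if_neg hc]
    obtain ⟨j', rfl⟩ : ∃ j', j = j' + 1 := ⟨j - 1, by omega⟩
    rw [List.getD_cons_succ]
    rcases Nat.eq_zero_or_pos j' with hj0 | hj1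
    · subst hj0
      -- R ≠ [] here since 1 < (c::R).length
      have hR : R ≠ [] := by intro hn; subst hn; simp at h2
      have hlen : (shiftA (adjL (R ++ rest))).length = (R ++ rest).length + 1 := by
        rw [shiftA_length, adjL_length]
      cases hX : shiftA (adjL (R ++ rest)) with
      | nil => rw [hX] at hlen; simp at hlen
      | cons x xs =>
        have hx : x = [] := by
          have h0 := shiftA_getD (adjL (R ++ rest)) 0
          rw [adjL_getD_zero R rest (fun y hy => h y (by simp [hy])) hR, hX] at h0
          simpa using h0
        subst hx
        simp [prep0]
    · obtain ⟨k, rfl⟩ : ∃ k, j' = k + 1 := ⟨j' - 1, by omega⟩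
      rw [prep0_getD_succ, shiftA_getD, ih (fun y hy => h y (by simp [hy])) (k+1) (by omega) (by simp at h2; omega)]
      simp

theorem adjL_getD_top (R cs' : List Char) (h : ∀ c ∈ R, c ≠ 'I') (hne : R ≠ []) :
    (adjL (R ++ 'I' :: cs')).getD R.length [] = [R.length - 1, R.length + 1] := by
  induction R with
  | nil => exact absurd rfl hne
  | cons c R ih =>
    have hc : c ≠ 'I' := h c (by simp)
    simp only [List.cons_append, adjL, if_neg hc, List.length_cons]
    rw [List.getD_cons_succ]
    cases hR : R with
    | nil =>
      subst hR
      simp [adjL, shiftA, prep0]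
    | cons c2 R2 =>
      rw [← hR]
      have hRne : R ≠ [] := by rw [hR]; simp
      obtain ⟨k, hk⟩ : ∃ k, R.length = k + 1 := ⟨R.length - 1, by rw [hR]; simp⟩
      rw [hk]
      rw [prep0_getD_succ, shiftA_getD]
      rw [← hk, ih (fun y hy => h y (by simp [hy])) hRne]
      simp [hk]

theorem adjL_getD_end (R : List Char) (h : ∀ c ∈ R, c ≠ 'I') (hne : R ≠ []) :
    (adjL R).getD R.length [] = [R.length - 1] := by
  induction R with
  | nil => exact absurd rfl hne
  | cons c R ih =>
    have hc : c ≠ 'I' := h c (by simp)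
    simp only [adjL, if_neg hc, List.length_cons]
    rw [List.getD_cons_succ]
    cases hR : R with
    | nil =>
      subst hR
      simp [adjL, shiftA, prep0]
    | cons c2 R2 =>
      rw [← hR]
      have hRne : R ≠ [] := by rw [hR]; simp
      obtain ⟨k, hk⟩ : ∃ k, R.length = k + 1 := ⟨R.length - 1, by rw [hR]; simp⟩
      rw [hk]
      rw [prep0_getD_succ, shiftA_getD]
      rw [← hk, ih (fun y hy => h y (by simp [hy])) hRne]
      simp [hk]

-- ---------- ordered insert ----------

theorem orderedInsert_le (x : Nat) (l : List Nat) (h : ∀ y ∈ l, x ≤ y) :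
    l.orderedInsert (· ≤ ·) x = x :: l := by
  cases l with
  | nil => rfl
  | cons y ys => simp [List.orderedInsert, h y (by simp)]

theorem orderedInsert_map_add (s x : Nat) (l : List Nat) :
    (l.map (· + s)).orderedInsert (· ≤ ·) (x + s) = (l.orderedInsert (· ≤ ·) x).map (· + s) := by
  induction l with
  | nil => rfl
  | cons y ys ih =>
    simp only [List.map_cons, List.orderedInsert]
    by_cases hxy : x ≤ y
    · rw [if_pos (by omega), if_pos hxy]
      simp
    · rw [if_neg (by omega), if_neg hxy]
      simp only [List.map_cons, ih]

-- ---------- the shift simulation: the loop on nodes ≥ s is the loop on the shifted instance ----------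

def fShift (s : Nat) (v : Int) : Int := if v = 0 then 0 else v + (s : Int)

theorem getD_map_adj (aj : List (List Nat)) (s cur : Nat) :
    (aj.map (List.map (· + s))).getD cur [] = (aj.getD cur []).map (· + s) := by
  simp only [List.getD_eq_getElem?_getD, List.getElem?_map]
  cases aj[cur]? <;> simp

theorem relax_shift (s : Nat) (lst : List Nat) : ∀ (dg pq : List Nat),
    (lst.map (· + s)).foldl relaxStep (List.replicate s 0 ++ dg, pq.map (· + s))
      = (List.replicate s 0 ++ (lst.foldl relaxStep (dg, pq)).1,
         ((lst.foldl relaxStep (dg, pq)).2).map (· + s)) := by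
  induction lst with
  | nil => intro dg pq; rfl
  | cons nxt lst ih =>
    intro dg pq
    simp only [List.map_cons, List.foldl_cons]
    have hset : (List.replicate s 0 ++ dg).set (nxt + s) ((List.replicate s 0 ++ dg).getD (nxt + s) 0 - 1)
        = List.replicate s 0 ++ dg.set nxt (dg.getD nxt 0 - 1) := by
      have e : nxt + s = (List.replicate s (0:Nat)).length + nxt := by simp; omega
      rw [e, getD_append_len, set_append_len]
    have hget : (List.replicate s 0 ++ dg.set nxt (dg.getD nxt 0 - 1)).getD (nxt + s) 0
        = (dg.set nxt (dg.getD nxt 0 - 1)).getD nxt 0 := by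
      have e : nxt + s = (List.replicate s (0:Nat)).length + nxt := by simp; omega
      rw [e, getD_append_len]
    show (lst.map (· + s)).foldl relaxStep (relaxStep (List.replicate s 0 ++ dg, pq.map (· + s)) (nxt + s)) = _
    rw [show relaxStep (List.replicate s 0 ++ dg, pq.map (· + s)) (nxt + s)
        = (if (dg.set nxt (dg.getD nxt 0 - 1)).getD nxt 0 = 0
           then (List.replicate s 0 ++ dg.set nxt (dg.getD nxt 0 - 1), (pq.orderedInsert (· ≤ ·) nxt).map (· + s))
           else (List.replicate s 0 ++ dg.set nxt (dg.getD nxt 0 - 1), pq.map (· + s))) from by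
      simp only [relaxStep, hset, hget]
      split
      · rw [orderedInsert_map_add]
      · rfl]
    rw [show relaxStep (dg, pq) nxt
        = (if (dg.set nxt (dg.getD nxt 0 - 1)).getD nxt 0 = 0
           then (dg.set nxt (dg.getD nxt 0 - 1), pq.orderedInsert (· ≤ ·) nxt)
           else (dg.set nxt (dg.getD nxt 0 - 1), pq)) from by
      simp only [relaxStep]]
    split
    · exact ih _ _
    · exact ih _ _

theorem loopA_shift (fuel : Nat) : ∀ (s : Nat) (dg : List Nat) (aj pre : List (List Nat))
    (front : List Int) (pq : List Nat) (rs : List Int) (m : Int),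
    pre.length = s → front.length = s → 1 ≤ m →
    loopA fuel (List.replicate s 0 ++ dg) (pre ++ aj.map (List.map (· + s)))
        (pq.map (· + s)) (front ++ rs.map (fShift s)) (m + (s : Int))
      = front ++ (loopA fuel dg aj pq rs m).map (fShift s) := by
  induction fuel with
  | zero => intro s dg aj pre front pq rs m hpre hfront hm; rfl
  | succ fuel ih =>
    intro s dg aj pre front pq rs m hpre hfront hm
    cases pq with
    | nil => rfl
    | cons cur rest =>
      have hres : (front ++ rs.map (fShift s)).set (cur + s) (m + (s : Int))
          = front ++ ((rs.set cur m).map (fShift s)) := by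
        have e : cur + s = front.length + cur := by omega
        rw [e, set_append_len]
        congr 1
        have hf : fShift s m = m + (s : Int) := by unfold fShift; rw [if_neg (by omega)]
        rw [List.map_set, hf]
      have hadj : (pre ++ aj.map (List.map (· + s))).getD (cur + s) [] = (aj.getD cur []).map (· + s) := by
        have e2 : cur + s = pre.length + cur := by omega
        rw [e2, getD_append_len, getD_map_adj]
      simp only [loopA, List.map_cons]
      rw [hres, hadj, relax_shift]
      rw [show m + (s : Int) + 1 = (m + 1) + (s : Int) by ring]
      exact ih s ((aj.getD cur []).foldl relaxStep (dg, rest)).1 aj pre front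
        ((aj.getD cur []).foldl relaxStep (dg, rest)).2 (rs.set cur m) (m+1) hpre hfront (by omega)

-- ---------- replicate-prefix index helpers ----------

theorem set_mid {α : Type} (k : Nat) (a : α) (b : List α) (v : α) :
    (List.replicate (k+1) a ++ b).set k v = List.replicate k a ++ (v :: b) := by
  have h1 : List.replicate (k+1) a ++ b = List.replicate k a ++ (a :: b) := by
    rw [List.replicate_add k 1 a, List.append_assoc]
    simp
  rw [h1]
  have := set_append_len (List.replicate k a) (a :: b) v 0
  simpa using this

theorem getD_mid {α : Type} (k : Nat) (a : α) (b : List α) (d : α) :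
    (List.replicate (k+1) a ++ b).getD k d = a := by
  rw [List.getD_append _ _ _ _ (by simp), List.getD_replicate _ (by omega)]

theorem getD_rep_after {α : Type} (k j : Nat) (a : α) (b : List α) (d : α) :
    (List.replicate k a ++ b).getD (k + j) d = b.getD j d := by
  have := getD_append_len (List.replicate k a) b d j
  simpa using this

theorem loopA_cons (fuel : Nat) (deg : List Nat) (adj : List (List Nat)) (cur : Nat)
    (pqrest : List Nat) (res : List Int) (m : Int) :
    loopA (fuel+1) deg adj (cur :: pqrest) res m
      = loopA fuel ((adj.getD cur []).foldl relaxStep (deg, pqrest)).1 adj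
          ((adj.getD cur []).foldl relaxStep (deg, pqrest)).2 (res.set cur m) (m + 1) := rfl

-- ---------- the descending sweep through one maximal run ----------

theorem loopA_desc : ∀ (i : Nat) (fuel : Nat) (Z : List Nat) (adj : List (List Nat)) (T : List Nat)
    (V : List Int) (t : Int),
    (∀ j, 1 ≤ j → j ≤ i → adj.getD j [] = [j-1]) → adj.getD 0 [] = [] → (∀ x ∈ T, i ≤ x) →
    loopA (fuel + (i+1)) (List.replicate i 1 ++ Z) adj (i :: T)
        (List.replicate (i+1) (0:Int) ++ V) (t + 1)
      = loopA fuel (List.replicate i 0 ++ Z) adj T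
        ((desc1 (i+1)).map (· + t) ++ V) (t + ((i:Int)+1) + 1) := by
  intro i
  induction i with
  | zero =>
    intro fuel Z adj T V t hadj hadj0 hT
    show loopA (fuel + 1) (List.replicate 0 1 ++ Z) adj (0 :: T) (List.replicate 1 0 ++ V) (t+1) = _
    rw [loopA_cons, hadj0]
    show loopA fuel (List.replicate 0 1 ++ Z) adj T ((List.replicate 1 0 ++ V).set 0 (t+1)) (t+1+1) = _
    have hres : (List.replicate 1 (0:Int) ++ V).set 0 (t+1) = (t+1) :: V := rfl
    have e4 : (desc1 (0+1)).map (· + t) ++ V = (t+1) :: V := by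
      simp [desc1, Int.add_comm]
    have e5 : t + ((0:Nat):Int) + 1 + 1 = t + 1 + 1 := by norm_num
    rw [hres, e4]
    show _ = loopA fuel (List.replicate 0 0 ++ Z) adj T ((t+1) :: V) (t + ((0:Int)+1) + 1)
    norm_num
  | succ i ihD =>
    intro fuel Z adj T V t hadj hadj0 hT
    have efuel : fuel + (i+1+1) = (fuel + (i+1)) + 1 := by omega
    rw [efuel]
    -- the written result cell
    have hres : (List.replicate (i+1+1) (0:Int) ++ V).set (i+1) (t+1)
        = List.replicate (i+1) (0:Int) ++ ((t+1) :: V) := set_mid (i+1) 0 V (t+1)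
    -- the adjacency of the popped node
    have hadj1 : adj.getD (i+1) [] = [i] := by
      have := hadj (i+1) (by omega) (by omega)
      simpa using this
    -- the relax fold: deg[i] goes 1 → 0 and i is pushed in front
    have hfold : [i].foldl relaxStep (List.replicate (i+1) 1 ++ Z, T)
        = (List.replicate i 1 ++ (0 :: Z), i :: T) := by
      have hg : (List.replicate (i+1) 1 ++ Z).getD i 0 = 1 := getD_mid i 1 Z 0
      have hs : (List.replicate (i+1) 1 ++ Z).set i (1-1) = List.replicate i 1 ++ (0 :: Z) :=
        set_mid i 1 Z (1-1)
      have hg2 : (List.replicate i 1 ++ (0 :: Z)).getD i 0 = 0 := by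
        have := getD_rep_after i 0 (1:Nat) (0 :: Z) 0
        simpa using this
      simp only [List.foldl_cons, List.foldl_nil, relaxStep, hg, hs, hg2, if_pos]
      rw [orderedInsert_le i T (fun y hy => by have := hT y hy; omega)]
    rw [loopA_cons, hadj1, hfold, hres]
    show loopA (fuel + (i+1)) (List.replicate i 1 ++ (0 :: Z)) adj (i :: T)
        (List.replicate (i+1) 0 ++ ((t+1) :: V)) ((t+1) + 1) = _
    have ihc := ihD (fuel) (0 :: Z) adj T ((t+1) :: V) (t+1)
      (fun j hj1 hj2 => hadj j hj1 (by omega)) hadj0 (fun x hx => by have := hT x hx; omega)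
    rw [ihc]
    -- align the three changed arguments
    have ed : List.replicate i (0:Nat) ++ (0 :: Z) = List.replicate (i+1) 0 ++ Z := by
      rw [List.replicate_add i 1 (0:Nat), List.append_assoc]
      simp
    have er : (desc1 (i+1)).map (· + (t+1)) ++ ((t+1) :: V) = (desc1 (i+1+1)).map (· + t) ++ V := by
      rw [desc1_step (i+1) t]
      simp [List.append_assoc]
    have em : (t+1) + ((i:Int)+1) + 1 = t + ((i:Int)+1+1) + 1 := by ring
    have ecast : ((i+1 : Nat) : Int) = (i:Int) + 1 := by push_cast; ring
    rw [ed, er, ecast, em]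

theorem loopA_desc' (i fuel F : Nat) (Z : List Nat) (adj : List (List Nat)) (T : List Nat)
    (V : List Int) (t : Int) (hF : F = fuel + (i+1)) :
    (∀ j, 1 ≤ j → j ≤ i → adj.getD j [] = [j-1]) → adj.getD 0 [] = [] → (∀ x ∈ T, i ≤ x) →
    loopA F (List.replicate i 1 ++ Z) adj (i :: T)
        (List.replicate (i+1) (0:Int) ++ V) (t + 1)
      = loopA fuel (List.replicate i 0 ++ Z) adj T
        ((desc1 (i+1)).map (· + t) ++ V) (t + ((i:Int)+1) + 1) := by
  subst hF
  exact loopA_desc i fuel Z adj T V t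

-- ---------- the B side: closed behaviour of altGo ----------

theorem altGo_offset : ∀ (cs : List Char) (k t : Int) (st : List Int),
    altGo cs (k + t) (st.map (· + t)) = (altGo cs k st).map (· + t) := by
  intro cs
  induction cs with
  | nil => intro k t st; simp [altGo]
  | cons c cs ih =>
    intro k t st
    by_cases hc : c = 'I'
    · simp only [altGo, if_pos hc, List.map_append, List.map_cons]
      rw [show k + t + 1 = (k + 1) + t by ring, ← ih (k+1) t []]
      rfl
    · simp only [altGo, if_neg hc]
      rw [show k + t + 1 = (k + 1) + t by ring, show (k + t) :: st.map (· + t) = ((k :: st).map (· + t)) from rfl]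
      exact ih (k+1) t (k :: st)

theorem altGo_run : ∀ (R : List Char) (rest : List Char) (k : Int) (st : List Int),
    (∀ c ∈ R, c ≠ 'I') →
    altGo (R ++ rest) k st = altGo rest (k + R.length) ((desc1 R.length).map (· + (k-1)) ++ st) := by
  intro R
  induction R with
  | nil => intro rest k st _; simp [desc1]
  | cons c R ih =>
    intro rest k st h
    have hc : c ≠ 'I' := h c (by simp)
    simp only [List.cons_append, altGo, if_neg hc, List.length_cons]
    rw [ih rest (k+1) (k :: st) (fun x hx => h x (by simp [hx]))]
    have ec : k + (((R.length + 1 : Nat)) : Int) = k + 1 + (R.length : Int) := by push_cast; ring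
    rw [ec]
    congr 1
    have e2 : k + 1 - 1 = k := by ring
    rw [e2, desc1_step R.length (k-1)]
    have e1 : k - 1 + 1 = k := by ring
    rw [e1]
    simp [List.append_assoc]

theorem altGo_end (R : List Char) (h : ∀ c ∈ R, c ≠ 'I') :
    altGo R 1 [] = desc1 (R.length + 1) := by
  have := altGo_run R [] 1 [] h
  simp only [List.append_nil] at this
  rw [this]
  rw [show desc1 (R.length + 1) = ((R.length : Int) + 1) :: desc1 R.length from rfl]
  simp [altGo, Int.add_comm]

theorem altGo_decomp (R cs' : List Char) (h : ∀ c ∈ R, c ≠ 'I') :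
    altGo (R ++ 'I' :: cs') 1 [] = desc1 (R.length + 1) ++ (altGo cs' 1 []).map (· + ((R.length : Int) + 1)) := by
  rw [altGo_run R ('I' :: cs') 1 [] h]
  simp only [altGo, if_pos]
  rw [show desc1 (R.length + 1) = ((R.length : Int) + 1) :: desc1 R.length from rfl]
  rw [show (1 : Int) + (R.length : Int) + 1 = 1 + ((R.length : Int) + 1) by ring]
  rw [← altGo_offset cs' 1 ((R.length : Int) + 1) []]
  simp [Int.add_comm]

theorem altGo_pos : ∀ (cs : List Char) (k : Int) (st : List Int), 1 ≤ k → (∀ v ∈ st, 1 ≤ v) →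
    ∀ v ∈ altGo cs k st, 1 ≤ v := by
  intro cs
  induction cs with
  | nil =>
    intro k st hk hst v hv
    simp [altGo] at hv
    rcases hv with rfl | hv
    · exact hk
    · exact hst v hv
  | cons c cs ih =>
    intro k st hk hst v hv
    by_cases hc : c = 'I'
    · simp only [altGo, if_pos hc, List.mem_append, List.mem_cons] at hv
      rcases hv with (rfl | hv) | hv
      · exact hk
      · exact hst v hv
      · exact ih (k+1) [] (by omega) (by simp) v hv
    · simp only [altGo, if_neg hc] at hv
      refine ih (k+1) (k :: st) (by omega) ?_ v hv
      intro w hw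
      rcases List.mem_cons.mp hw with rfl | hw
      · exact hk
      · exact hst w hw

-- ---------- assembling the A side ----------

theorem listA_unfold (cs : List Char) :
    listA cs = loopA (cs.length + 1) (degL cs) (adjL cs)
      ((List.range (cs.length + 1)).filter (fun i => (degL cs).getD i 0 == 0))
      (List.replicate (cs.length + 1) 0) 1 := by
  simp only [listA, build_init]

theorem desc1_map_zero (n : Nat) : (desc1 n).map (· + (0:Int)) = desc1 n := by
  simp

theorem filter_range_first (d : Nat) (p : Nat → Bool) (h1 : ∀ j < d, p j = false) (hd : p d = true) :
    (List.range (d+1)).filter p = [d] := by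
  rw [List.range_succ, List.filter_append]
  have h0 : (List.range d).filter p = [] := by
    apply List.filter_eq_nil_iff.mpr
    intro j hj
    simp [h1 j (List.mem_range.mp hj)]
  rw [h0]
  simp [hd]

theorem pq_rel (n0 : Nat) (x : Nat) (xs : List Nat) :
    (List.range (n0+1)).filter (fun t => ((x :: xs).getD t 0) == 0)
      = (if x = 0 then [0] else []) ++ (List.range (n0+1)).filter (fun t => (((x+1) :: xs).getD t 0) == 0) := by
  have htail : ∀ y ∈ (List.range n0).map Nat.succ,
      (((x :: xs).getD y 0) == 0) = ((((x+1) :: xs).getD y 0) == 0) := by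
    intro y hy
    obtain ⟨k, _, rfl⟩ := List.mem_map.mp hy
    rfl
  rw [List.range_succ_eq_map, List.filter_cons, List.filter_cons, List.filter_congr htail]
  by_cases hx : x = 0
  · subst hx
    simp
  · simp [hx]

theorem Y_pos (n' x : Nat) (xs : List Nat) :
    ∀ y ∈ (List.range n').filter (fun t => (((x+1) :: xs).getD t 0) == 0), 1 ≤ y := by
  intro y hy
  have hp := (List.mem_filter.mp hy).2
  cases y with
  | zero => simp at hp
  | succ k => omega

theorem listA_end (R : List Char) (h : ∀ c ∈ R, c ≠ 'I') :
    listA R = desc1 (R.length + 1) := by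
  rw [listA_unfold]
  have hdeg : degL R = List.replicate R.length 1 ++ [0] := by
    have := degL_run R [] h
    simpa [degL] using this
  cases R with
  | nil => rfl
  | cons c R' =>
    have hRne : (c :: R') ≠ [] := by simp
    simp only [List.length_cons] at hdeg ⊢
    set d' := R'.length with hd'
    -- the only initial source is node d'+1
    have hpq : (List.range (d'+1+1)).filter (fun i => (degL (c :: R')).getD i 0 == 0) = [d'+1] := by
      apply filter_range_first
      · intro j hj
        rw [hdeg, List.getD_append _ _ _ _ (by simp; omega), List.getD_replicate _ (by omega)]
        rfl
      · rw [hdeg]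
        have := getD_rep_after (d'+1) 0 (1:Nat) [0] 0
        simp at this
        simp [this]
    rw [hpq, loopA_cons]
    -- adjacency of the popped top node
    have hadjd : (adjL (c :: R')).getD (d'+1) [] = [d'] := by
      have := adjL_getD_end (c :: R') h hRne
      simpa using this
    rw [hadjd]
    -- the relax fold on [d']
    have hfold : List.foldl relaxStep (degL (c :: R'), []) [d']
        = (List.replicate d' 1 ++ (0 :: [0]), [d']) := by
      rw [hdeg]
      have hg : (List.replicate (d'+1) 1 ++ [0]).getD d' 0 = 1 := getD_mid d' 1 [0] 0
      have hs : (List.replicate (d'+1) 1 ++ [0]).set d' (1-1) = List.replicate d' 1 ++ ((1-1) :: [0]) :=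
        set_mid d' 1 [0] (1-1)
      have hg2 : (List.replicate d' 1 ++ ((1-1) :: [0])).getD d' 0 = 0 := by
        have := getD_rep_after d' 0 (1:Nat) ((1-1) :: [0]) 0
        simpa using this
      simp only [List.foldl_cons, List.foldl_nil, relaxStep, hg, hs, hg2, if_pos]
      rfl
    rw [hfold]
    -- the written cell of the top node
    have hres : (List.replicate (d'+1+1) (0:Int)).set (d'+1) 1 = List.replicate (d'+1) 0 ++ [1] := by
      have h0 : List.replicate (d'+1+1) (0:Int) = List.replicate (d'+1+1) 0 ++ [] := by simp
      rw [h0, set_mid (d'+1) 0 [] 1]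
    rw [hres]
    show loopA (d'+1) (List.replicate d' 1 ++ (0 :: [0])) (adjL (c :: R')) (d' :: [])
        (List.replicate (d'+1) 0 ++ [1]) ((1:Int) + 1) = _
    rw [loopA_desc' d' 0 (d'+1) (0 :: [0]) (adjL (c :: R')) [] [1] 1 (by omega)
      (fun j hj1 hj2 => by
        have := adjL_getD_mid (c :: R') [] h j hj1 (by simp; omega)
        simpa using this)
      (by have := adjL_getD_zero (c :: R') [] h hRne; simpa using this)
      (by simp)]
    show (desc1 (d'+1)).map (· + (1:Int)) ++ [1] = desc1 (d'+1+1)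
    have := desc1_step (d'+1) 0
    rw [desc1_map_zero] at this
    rw [this]
    norm_num

theorem pq_init (d n' : Nat) (W : List Nat) :
    (List.range ((d+1) + n')).filter (fun i => (List.replicate d 1 ++ (0 :: W)).getD i 0 == 0)
      = d :: ((List.range n').filter (fun t => W.getD t 0 == 0)).map (fun t => (d+1) + t) := by
  rw [List.range_add, List.filter_append]
  have h1 : (List.range (d+1)).filter (fun i => (List.replicate d 1 ++ (0 :: W)).getD i 0 == 0) = [d] := by
    apply filter_range_first
    · intro j hj
      rw [List.getD_append _ _ _ _ (by simp; omega), List.getD_replicate _ (by omega)]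
      rfl
    · have := getD_rep_after d 0 (1:Nat) (0 :: W) 0
      simp only [Nat.add_zero] at this
      simp [this]
  rw [h1, List.filter_map]
  have h2 : ∀ t ∈ List.range n',
      ((fun i => (List.replicate d 1 ++ (0 :: W)).getD i 0 == 0) ∘ (fun x => (d+1) + x)) t
        = (W.getD t 0 == 0) := by
    intro t _
    have e : (d+1)+t = d + (1+t) := by omega
    simp only [Function.comp_apply, e, getD_rep_after]
    have e2 : 1 + t = t + 1 := by omega
    rw [e2, List.getD_cons_succ]
  rw [List.filter_congr h2]
  rfl

theorem rep_chain (k j : Nat) {α : Type} (a : α) (b : List α) :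
    List.replicate k a ++ (List.replicate j a ++ b) = List.replicate (k + j) a ++ b := by
  rw [List.replicate_add, List.append_assoc]

theorem listA_decomp (R cs' : List Char) (h : ∀ c ∈ R, c ≠ 'I') :
    listA (R ++ 'I' :: cs') = desc1 (R.length + 1) ++ (listA cs').map (fShift (R.length + 1)) := by
  obtain ⟨h0, t0, hL⟩ := degL_ne_nil cs'
  obtain ⟨pre, hprelen, hadjsplit⟩ := adjL_split R cs' h
  have hdeg : degL (R ++ 'I' :: cs') = List.replicate R.length 1 ++ (0 :: ((h0+1) :: t0)) := by
    rw [degL_run R ('I' :: cs') h]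
    simp [degL, hL, bump]
  have hn : (R ++ 'I' :: cs').length + 1 = (R.length + 1) + (cs'.length + 1) := by
    simp
    omega
  have hfrep : ∀ nn ss : Nat, (List.replicate nn (0:Int)).map (fShift ss) = List.replicate nn 0 := by
    intro nn ss
    simp [fShift]
  -- the sources of the tail pattern, as a filter over the tail's degree vector
  have hpq' : (List.range (cs'.length + 1)).filter (fun t => (degL cs').getD t 0 == 0)
      = (if h0 = 0 then [0] else []) ++
        (List.range (cs'.length + 1)).filter (fun t => (((h0+1) :: t0)).getD t 0 == 0) := by
    rw [hL]
    exact pq_rel cs'.length h0 t0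
  rw [listA_unfold, hn, hdeg, pq_init R.length (cs'.length + 1) ((h0+1) :: t0)]
  cases R with
  | nil =>
    simp only [List.length_nil, List.nil_append] at *
    have ef : (0 + 1) + (cs'.length + 1) = (cs'.length + 1) + 1 := by omega
    rw [ef, loopA_cons]
    have hadjd : (adjL ('I' :: cs')).getD 0 [] = [1] := by simp [adjL]
    rw [hadjd]
    have hfold : List.foldl relaxStep
        ((List.replicate 0 1 ++ (0 :: (h0+1) :: t0)),
          ((List.range (cs'.length + 1)).filter (fun t => (((h0+1) :: t0)).getD t 0 == 0)).map (fun t => (0+1) + t)) [1]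
        = (0 :: h0 :: t0,
           ((if h0 = 0 then [0] else []) ++
             (List.range (cs'.length + 1)).filter (fun t => (((h0+1) :: t0)).getD t 0 == 0)).map (· + 1)) := by
      simp only [List.foldl_cons, List.foldl_nil, relaxStep, List.replicate, List.nil_append]
      have hg : (0 :: (h0+1) :: t0).getD 1 0 = h0 + 1 := rfl
      have hs : (0 :: (h0+1) :: t0).set 1 (h0 + 1 - 1) = 0 :: h0 :: t0 := by
        simp
      rw [hg, hs]
      have hmap : ((List.range (cs'.length + 1)).filter (fun t => (((h0+1) :: t0)).getD t 0 == 0)).map (fun t => (0+1) + t)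
          = ((List.range (cs'.length + 1)).filter (fun t => (((h0+1) :: t0)).getD t 0 == 0)).map (· + 1) := by
        apply List.map_congr_left
        intro z _
        omega
      rw [hmap]
      by_cases hh : h0 = 0
      · subst hh
        rw [if_pos (by rfl)]
        simp only [if_pos rfl, List.map_append]
        rw [orderedInsert_le 1 _ (by
          intro y hy
          obtain ⟨z, hz, rfl⟩ := List.mem_map.mp hy
          have := Y_pos (cs'.length + 1) 0 t0 z hz
          omega)]
        rfl
      · rw [if_neg (by simpa using hh)]
        simp [hh]
    rw [hfold]
    have hres2 : (List.replicate ((cs'.length + 1) + 1) (0:Int)).set 0 1 = 1 :: List.replicate (cs'.length + 1) 0 := by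
      have e : (cs'.length + 1) + 1 = 1 + (cs'.length + 1) := by omega
      rw [e, List.replicate_add]
      rfl
    rw [hres2]
    show loopA (cs'.length + 1) (0 :: h0 :: t0) (adjL ('I' :: cs'))
        (((if h0 = 0 then [0] else []) ++
          (List.range (cs'.length + 1)).filter (fun t => (((h0+1) :: t0)).getD t 0 == 0)).map (· + 1))
        (1 :: List.replicate (cs'.length + 1) 0) (1 + 1) = _
    rw [← hpq']
    have hdg1 : (0 :: h0 :: t0) = List.replicate 1 0 ++ degL cs' := by rw [hL]; rfl
    have hfr : (1 : Int) :: List.replicate (cs'.length + 1) 0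
        = desc1 1 ++ (List.replicate (cs'.length + 1) (0:Int)).map (fShift 1) := by
      rw [hfrep]
      rfl
    have hcnt : (1 : Int) + 1 = 1 + ((1:Nat) : Int) := by norm_num
    simp only [List.length_nil, Nat.zero_add] at hprelen hadjsplit
    rw [hdg1, hfr, hcnt, hadjsplit]
    rw [loopA_shift (cs'.length + 1) 1 (degL cs') (adjL cs') pre (desc1 1) _ _ 1 hprelen (by rfl) (by omega)]
    rw [← listA_unfold cs']
  | cons c R' =>
    simp only [List.length_cons] at *
    have ef : (R'.length + 1 + 1) + (cs'.length + 1) = ((R'.length + 1) + (cs'.length + 1)) + 1 := by omega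
    rw [ef, loopA_cons]
    have hRne : (c :: R') ≠ [] := by simp
    have hadjd : (adjL ((c :: R') ++ 'I' :: cs')).getD (R'.length + 1) [] = [R'.length, R'.length + 2] := by
      have := adjL_getD_top (c :: R') cs' h hRne
      simp only [List.length_cons] at this
      simpa using this
    rw [hadjd]
    set Y := (List.range (cs'.length + 1)).filter (fun t => (((h0+1) :: t0)).getD t 0 == 0) with hY
    have hYpos : ∀ y ∈ Y, 1 ≤ y := Y_pos (cs'.length + 1) h0 t0
    have hmap : Y.map (fun t => (R'.length + 1 + 1) + t) = Y.map (· + (R'.length + 2)) := by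
      apply List.map_congr_left
      intro z _
      omega
    rw [hmap]
    have hfold : List.foldl relaxStep
        ((List.replicate (R'.length + 1) 1 ++ (0 :: (h0+1) :: t0)), Y.map (· + (R'.length + 2)))
        [R'.length, R'.length + 2]
        = (List.replicate R'.length 1 ++ (0 :: 0 :: h0 :: t0),
           R'.length :: ((if h0 = 0 then [0] else []) ++ Y).map (· + (R'.length + 2))) := by
      simp only [List.foldl_cons, List.foldl_nil, relaxStep]
      have hg1 : (List.replicate (R'.length + 1) 1 ++ (0 :: (h0+1) :: t0)).getD R'.length 0 = 1 :=
        getD_mid R'.length 1 _ 0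
      have hs1 : (List.replicate (R'.length + 1) 1 ++ (0 :: (h0+1) :: t0)).set R'.length (1-1)
          = List.replicate R'.length 1 ++ ((1-1) :: 0 :: (h0+1) :: t0) :=
        set_mid R'.length 1 _ (1-1)
      have hg1b : (List.replicate R'.length 1 ++ ((1-1) :: 0 :: (h0+1) :: t0)).getD R'.length 0 = 0 := by
        have := getD_rep_after R'.length 0 (1:Nat) ((1-1) :: 0 :: (h0+1) :: t0) 0
        simpa using this
      rw [hg1, hs1, hg1b, if_pos rfl]
      rw [orderedInsert_le R'.length _ (by
        intro y hy
        obtain ⟨z, hz, rfl⟩ := List.mem_map.mp hy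
        omega)]
      have hg2 : (List.replicate R'.length 1 ++ ((1-1) :: 0 :: (h0+1) :: t0)).getD (R'.length + 2) 0 = h0 + 1 := by
        have := getD_rep_after R'.length 2 (1:Nat) ((1-1) :: 0 :: (h0+1) :: t0) 0
        simpa using this
      have hs2 : (List.replicate R'.length 1 ++ ((1-1) :: 0 :: (h0+1) :: t0)).set (R'.length + 2) (h0 + 1 - 1)
          = List.replicate R'.length 1 ++ ((1-1) :: 0 :: (h0 + 1 - 1) :: t0) := by
        have := set_append_len (List.replicate R'.length (1:Nat)) ((1-1) :: 0 :: (h0+1) :: t0) (h0 + 1 - 1) 2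
        simpa using this
      have hg2b : (List.replicate R'.length 1 ++ ((1-1) :: 0 :: (h0 + 1 - 1) :: t0)).getD (R'.length + 2) 0 = h0 := by
        have := getD_rep_after R'.length 2 (1:Nat) ((1-1) :: 0 :: (h0 + 1 - 1) :: t0) 0
        simp at this
        simpa using this
      rw [hg2, hs2, hg2b]
      by_cases hh : h0 = 0
      · subst hh
        rw [if_pos rfl]
        have hoi : (R'.length :: Y.map (· + (R'.length + 2))).orderedInsert (· ≤ ·) (R'.length + 2)
            = R'.length :: (R'.length + 2) :: Y.map (· + (R'.length + 2)) := by
          rw [List.orderedInsert]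
          rw [if_neg (by omega)]
          rw [orderedInsert_le (R'.length + 2) _ (by
            intro y hy
            obtain ⟨z, hz, rfl⟩ := List.mem_map.mp hy
            have := hYpos z hz
            omega)]
        rw [hoi]
        simp only [Prod.mk.injEq]
        refine ⟨by simp, by simp⟩
      · rw [if_neg (by simpa using hh)]
        simp only [Prod.mk.injEq]
        refine ⟨by simp, by simp [hh]⟩
    rw [hfold]
    have hres : (List.replicate (((R'.length + 1) + (cs'.length + 1)) + 1) (0:Int)).set (R'.length + 1) 1
        = List.replicate (R'.length + 1) 0 ++ (1 :: List.replicate (cs'.length + 1) 0) := by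
      have e : ((R'.length + 1) + (cs'.length + 1)) + 1 = ((R'.length + 1) + 1) + (cs'.length + 1) := by omega
      rw [e, List.replicate_add]
      exact set_mid (R'.length + 1) 0 _ 1
    rw [hres]
    show loopA ((R'.length + 1) + (cs'.length + 1))
        (List.replicate R'.length 1 ++ (0 :: 0 :: h0 :: t0))
        (adjL ((c :: R') ++ 'I' :: cs'))
        (R'.length :: ((if h0 = 0 then [0] else []) ++ Y).map (· + (R'.length + 2)))
        (List.replicate (R'.length + 1) 0 ++ (1 :: List.replicate (cs'.length + 1) 0)) ((1:Int) + 1) = _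
    have hdesc := loopA_desc' R'.length (cs'.length + 1) ((R'.length + 1) + (cs'.length + 1))
      (0 :: 0 :: h0 :: t0) (adjL ((c :: R') ++ 'I' :: cs'))
      (((if h0 = 0 then [0] else []) ++ Y).map (· + (R'.length + 2)))
      (1 :: List.replicate (cs'.length + 1) 0) 1 (by omega)
      (fun j hj1 hj2 => by
        have := adjL_getD_mid (c :: R') ('I' :: cs') h j hj1 (by simp; omega)
        simpa using this)
      (by exact adjL_getD_zero (c :: R') ('I' :: cs') h hRne)
      (by
        intro x hx
        obtain ⟨z, hz, rfl⟩ := List.mem_map.mp hx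
        omega)
    rw [hdesc]
    -- now hand over to the shifted tail run
    have hdg2 : List.replicate R'.length (0:Nat) ++ (0 :: 0 :: h0 :: t0)
        = List.replicate (R'.length + 2) 0 ++ degL cs' := by
      rw [hL]
      have : (0 :: 0 :: h0 :: t0) = List.replicate 2 0 ++ (h0 :: t0) := rfl
      rw [this, rep_chain]
    have hfr : (desc1 (R'.length + 1)).map (· + (1:Int)) ++ (1 :: List.replicate (cs'.length + 1) 0)
        = desc1 (R'.length + 2) ++ (List.replicate (cs'.length + 1) (0:Int)).map (fShift (R'.length + 2)) := by
      rw [hfrep]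
      have hds := desc1_step (R'.length + 1) 0
      rw [desc1_map_zero] at hds
      norm_num at hds
      have e : R'.length + 1 + 1 = R'.length + 2 := by omega
      rw [e] at hds
      rw [hds, List.append_assoc]
      rfl
    have hcnt : (1:Int) + ((R'.length : Int) + 1) + 1 = 1 + (((R'.length + 2 : Nat)) : Int) := by
      push_cast
      ring
    have e2 : R'.length + 1 + 1 = R'.length + 2 := by omega
    rw [e2] at hprelen hadjsplit
    rw [hdg2, hfr, hcnt, ← hpq', hadjsplit]
    rw [loopA_shift (cs'.length + 1) (R'.length + 2) (degL cs') (adjL cs') pre (desc1 (R'.length + 2)) _ _ 1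
      hprelen (desc1_length _) (by omega)]
    rw [← listA_unfold cs', e2]

theorem dropWhile_head_false {α : Type} (p : α → Bool) :
    ∀ (l : List α) (a : α) (t : List α), l.dropWhile p = a :: t → p a = false := by
  intro l
  induction l with
  | nil => intro a t h; simp [List.dropWhile] at h
  | cons x xs ih =>
    intro a t h
    rw [List.dropWhile_cons] at h
    by_cases hx : p x = true
    · rw [if_pos hx] at h
      exact ih a t h
    · rw [if_neg hx] at h
      injection h with h1 h2
      subst h1
      simpa using hx

theorem listA_eq_altGo : ∀ (cs : List Char), listA cs = altGo cs 1 [] := by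
  have key : ∀ (n : Nat) (cs : List Char), cs.length ≤ n → listA cs = altGo cs 1 [] := by
    intro n
    induction n with
    | zero =>
      intro cs hl
      have hnil : cs = [] := List.length_eq_zero_iff.mp (by omega)
      subst hnil
      rw [listA_end [] (by simp), altGo_end [] (by simp)]
    | succ n ih =>
      intro cs hl
      set R := cs.takeWhile (fun c => !(c == 'I')) with hR
      set rest := cs.dropWhile (fun c => !(c == 'I')) with hrest
      have hsplit : R ++ rest = cs := List.takeWhile_append_dropWhile
      have hnonI : ∀ c ∈ R, c ≠ 'I' := by
        intro c hc
        have := List.mem_takeWhile_imp hc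
        simpa using this
      cases hre : rest with
      | nil =>
        rw [← hsplit, hre, List.append_nil, listA_end R hnonI, altGo_end R hnonI]
      | cons c0 cs' =>
        have hne : rest ≠ [] := by rw [hre]; simp
        have hc0 : c0 = 'I' := by
          have hd := dropWhile_head_false (fun c => !(c == 'I')) cs c0 cs' (by rw [← hrest]; exact hre)
          simpa using hd
        subst hc0
        have hlen : cs'.length ≤ n := by
          have h1 : cs.length = R.length + cs'.length + 1 := by
            rw [← hsplit, hre]
            simp
            omega
          omega
        rw [← hsplit, hre, listA_decomp R cs' hnonI, altGo_decomp R cs' hnonI, ih cs' hlen]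
        congr 1
        apply List.map_congr_left
        intro v hv
        have hpos := altGo_pos cs' 1 [] (by omega) (by simp) v hv
        unfold fShift
        rw [if_neg (by omega)]
        push_cast
        ring
  intro cs
  exact key cs.length cs (le_refl _)

theorem findPermutation2_spec : Claim_equal_findPermutation2 := by
  intro pattern _
  show findPermutation2 pattern = findPermutation2_alt pattern
  unfold findPermutation2 findPermutation2_alt
  exact listA_eq_altGo pattern.toList
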